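-- pv_equiv track=rewrite | github.com/rahulgh-stack/fifa-marketplace-tracker | create_website.py | extract_venue_from_listings
-- ===== SOURCE A (Python) =====
-- def extract_venue_from_listings(listings):
--     """Extract venue name from listing text"""
--     venues = []
--     for listing in listings:
--         text = listing.get('text', '')
--         title = listing.get('title', '')
--
--         # Look for venue patterns in text and title
--         combined_text = f"{text} {title}".upper()
--
--         if 'MEXICO CITY' in combined_text or 'AZTECA' in combined_text:
--             venues.append('Mexico City')
--         elif 'TORONTO' in combined_text:
--             venues.append('Toronto')
--         elif 'NEW YORK' in combined_text:
--             venues.append('New York')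
--         elif 'KANSAS CITY' in combined_text:
--             venues.append('Kansas City')
--         elif 'MIAMI' in combined_text:
--             venues.append('Miami')
--         elif 'ATLANTA' in combined_text:
--             venues.append('Atlanta')
--         elif 'HOUSTON' in combined_text:
--             venues.append('Houston')
--         elif 'SEATTLE' in combined_text:
--             venues.append('Seattle')
--         elif 'PHILADELPHIA' in combined_text:
--             venues.append('Philadelphia')
--         elif 'VANCOUVER' in combined_text:
--             venues.append('Vancouver')
--         elif 'FOXBOROUGH' in combined_text or 'GILLETTE' in combined_text:
--             venues.append('Foxborough')
--         elif 'INGLEWOOD' in combined_text or 'SOFI' in combined_text: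
--             venues.append('Inglewood')
--         elif 'ARLINGTON' in combined_text:
--             venues.append('Arlington')
--         elif 'SANTA CLARA' in combined_text:
--             venues.append('Santa Clara')
--         elif 'GUADALUPE' in combined_text:
--             venues.append('Guadalupe')
--         elif 'ZAPOPAN' in combined_text:
--             venues.append('Zapopan')
--
--     # Return most common venue or 'Unknown'
--     if venues:
--         return max(set(venues), key=venues.count)
--     return 'Unknown'
-- ===== SOURCE B (Python) =====
-- VENUES = [
--     (('MEXICO CITY', 'AZTECA'), 'Mexico City'),
--     (('TORONTO',), 'Toronto'),
--     (('NEW YORK',), 'New York'),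
--     (('KANSAS CITY',), 'Kansas City'),
--     (('MIAMI',), 'Miami'),
--     (('ATLANTA',), 'Atlanta'),
--     (('HOUSTON',), 'Houston'),
--     (('SEATTLE',), 'Seattle'),
--     (('PHILADELPHIA',), 'Philadelphia'),
--     (('VANCOUVER',), 'Vancouver'),
--     (('FOXBOROUGH', 'GILLETTE'), 'Foxborough'),
--     (('INGLEWOOD', 'SOFI'), 'Inglewood'),
--     (('ARLINGTON',), 'Arlington'),
--     (('SANTA CLARA',), 'Santa Clara'),
--     (('GUADALUPE',), 'Guadalupe'),
--     (('ZAPOPAN',), 'Zapopan'),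
-- ]
--
--
-- def extract_venue_from_listings(listings):
--     """Extract venue name from listing text"""
--     # Venue-major traversal: for each venue (in priority order) count the
--     # listings whose highest-priority match is that venue, keeping a running
--     # argmax; no per-listing classification list or counter is ever built.
--     texts = [f"{l.get('text', '')} {l.get('title', '')}".upper() for l in listings]
--     best, best_count = 'Unknown', 0
--     earlier = []
--     for keywords, venue in VENUES:
--         n = 0
--         for t in texts:
--             if any(k in t for k in keywords) and not any(k in t for kws in earlier for k in kws):
--                 n += 1
--         if n > best_count:
--             best, best_count = venue, n
--         earlier.append(keywords)
--     return best
-- ===== Notes on version B (the rewrite author's own statement) =====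
-- stated objective: alternative
-- what changed: Inverts the traversal: instead of A's listing-major if/elif chain building a venues list and taking max(set(venues), key=venues.count), B is venue-major -- for each venue in priority order it counts the listings whose highest-priority keyword match is that venue and keeps a running strict-improvement argmax, never materialising a per-listing classification list or counter; Pre_ excludes inputs whose classified venues tie for most common, where A's max over a hash-ordered set is run-to-run nondeterministic.
-- outside the precondition, e.g. on extract_venue_from_listings([{'text': 'Miami'}, {'title': 'Toronto'}]): A returns 'Toronto', B returns 'Toronto'
import Mathlib
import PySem

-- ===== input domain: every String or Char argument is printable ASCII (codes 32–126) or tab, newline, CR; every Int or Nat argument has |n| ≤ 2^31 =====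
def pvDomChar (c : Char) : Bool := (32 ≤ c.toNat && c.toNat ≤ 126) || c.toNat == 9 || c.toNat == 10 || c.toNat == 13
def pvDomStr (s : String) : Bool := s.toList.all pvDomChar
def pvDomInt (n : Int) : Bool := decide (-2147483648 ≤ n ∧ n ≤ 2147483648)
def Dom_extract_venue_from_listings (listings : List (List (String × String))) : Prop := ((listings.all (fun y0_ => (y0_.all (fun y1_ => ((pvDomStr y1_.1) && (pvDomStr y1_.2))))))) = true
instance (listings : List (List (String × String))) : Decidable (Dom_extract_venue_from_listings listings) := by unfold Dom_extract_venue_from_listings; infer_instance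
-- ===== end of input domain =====

-- B inverts A's traversal: instead of classifying listing by listing and taking
-- max(set(venues), key=venues.count), it loops over the venues in priority order,
-- counts for each the listings whose highest-priority match it is, and keeps a
-- running strict-improvement argmax (objective: alternative).

-- ===== PORT A =====
-- combined = f"{listing.get('text','')} {listing.get('title','')}".upper()  (shared: both Pythons contain this line)
def pvComb (listing : List (String × String)) : List Char :=
  PySem.Chars.upper (((PySem.Dict.ofList listing).getD "text" "").toList
    ++ ' ' :: ((PySem.Dict.ofList listing).getD "title" "").toList)

-- 'sub in combined'
def pvIn (sub : String) (c : List Char) : Bool := PySem.Chars.isIn sub.toList c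

-- the two final lines of A: 'if venues: return max(set(venues), key=venues.count); return "Unknown"'
-- (.getD "Unknown" is unreachable filler: max? is some on a nonempty set)
def pvPick (venues : List String) : String :=
  if venues = [] then "Unknown"
  else (PySem.List.max? (PySem.Set.ofList venues) (fun v => PySem.List.count venues v)).getD "Unknown"

def extract_venue_from_listings (listings : List (List (String × String))) : String :=
  pvPick (listings.foldl (fun acc listing =>
    let c := pvComb listing
    if pvIn "MEXICO CITY" c || pvIn "AZTECA" c then acc ++ ["Mexico City"]
    else if pvIn "TORONTO" c then acc ++ ["Toronto"]
    else if pvIn "NEW YORK" c then acc ++ ["New York"]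
    else if pvIn "KANSAS CITY" c then acc ++ ["Kansas City"]
    else if pvIn "MIAMI" c then acc ++ ["Miami"]
    else if pvIn "ATLANTA" c then acc ++ ["Atlanta"]
    else if pvIn "HOUSTON" c then acc ++ ["Houston"]
    else if pvIn "SEATTLE" c then acc ++ ["Seattle"]
    else if pvIn "PHILADELPHIA" c then acc ++ ["Philadelphia"]
    else if pvIn "VANCOUVER" c then acc ++ ["Vancouver"]
    else if pvIn "FOXBOROUGH" c || pvIn "GILLETTE" c then acc ++ ["Foxborough"]
    else if pvIn "INGLEWOOD" c || pvIn "SOFI" c then acc ++ ["Inglewood"]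
    else if pvIn "ARLINGTON" c then acc ++ ["Arlington"]
    else if pvIn "SANTA CLARA" c then acc ++ ["Santa Clara"]
    else if pvIn "GUADALUPE" c then acc ++ ["Guadalupe"]
    else if pvIn "ZAPOPAN" c then acc ++ ["Zapopan"]
    else acc) [])

-- ===== PORT B =====
-- the VENUES table of Source B, in the same priority order
def pvTable : List (List String × String) :=
  [(["MEXICO CITY", "AZTECA"], "Mexico City"),
   (["TORONTO"], "Toronto"),
   (["NEW YORK"], "New York"),
   (["KANSAS CITY"], "Kansas City"),
   (["MIAMI"], "Miami"),
   (["ATLANTA"], "Atlanta"),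
   (["HOUSTON"], "Houston"),
   (["SEATTLE"], "Seattle"),
   (["PHILADELPHIA"], "Philadelphia"),
   (["VANCOUVER"], "Vancouver"),
   (["FOXBOROUGH", "GILLETTE"], "Foxborough"),
   (["INGLEWOOD", "SOFI"], "Inglewood"),
   (["ARLINGTON"], "Arlington"),
   (["SANTA CLARA"], "Santa Clara"),
   (["GUADALUPE"], "Guadalupe"),
   (["ZAPOPAN"], "Zapopan")]

-- 'any(k in t for k in kws)'
def pvMatch (t : List Char) (kws : List String) : Bool := kws.any (fun k => pvIn k t)

-- Source B's inner loop: n = 0; for t in texts: if match(keywords) and not match(earlier): n += 1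
def pvCount (texts : List (List Char)) (kws : List String) (earlier : List (List String)) : Nat :=
  texts.foldl (fun n t =>
    if pvMatch t kws && !(earlier.any (fun kws' => pvMatch t kws')) then n + 1 else n) 0

-- Source B's outer loop over VENUES, state (best, best_count, earlier)
def extract_venue_from_listings_alt (listings : List (List (String × String))) : String :=
  let texts := listings.map pvComb
  (pvTable.foldl (fun st e =>
      let n := pvCount texts e.1 st.2.2
      let p := if n > st.2.1 then (e.2, n) else (st.1, st.2.1)
      (p.1, p.2, st.2.2 ++ [e.1]))
    ("Unknown", 0, ([] : List (List String)))).1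

-- ===== PRECONDITION & SPEC =====
-- the venue classified for a listing, stated declaratively (first table entry one of whose
-- keywords occurs in the listing's combined text); used only to state Pre_
def pvVenueOf (l : List (String × String)) : Option String :=
  (pvTable.find? (fun e => e.1.any (fun k => pvIn k (pvComb l)))).map (·.2)

def pvVenues (listings : List (List (String × String))) : List String :=
  listings.filterMap pvVenueOf

-- Pre_ excludes listings whose classified venues have a TIE for the most common venue: there Python A's
-- max(set(venues), key=venues.count) depends on hash-randomized set iteration order, so A's value is
-- accidental (it varies between runs) and no fixed value can be matched.
def Pre_extract_venue_from_listings (listings : List (List (String × String))) : Prop :=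
  ∀ v ∈ pvVenues listings, ∀ w ∈ pvVenues listings,
    (∀ u ∈ pvVenues listings, (pvVenues listings).count u ≤ (pvVenues listings).count v) →
    (pvVenues listings).count w = (pvVenues listings).count v → w = v
instance (listings : List (List (String × String))) : Decidable (Pre_extract_venue_from_listings listings) := by
  unfold Pre_extract_venue_from_listings; infer_instance

def pvWitness_extract_venue_from_listings : (List (List (String × String))) :=
  [[("text", "Miami stadium")], [("title", "seats in MIAMI")], [("text", "Toronto")]]

def Spec_extract_venue_from_listings (listings : List (List (String × String))) (out : String) : Prop := out = extract_venue_from_listings_alt listings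
instance (listings : List (List (String × String))) (out : String) : Decidable (Spec_extract_venue_from_listings listings out) := by unfold Spec_extract_venue_from_listings; infer_instance

-- ===== CLAIM (what is proved, stated in full; the proofs are below) =====
def Claim_equal_extract_venue_from_listings : Prop := ∀ (listings : List (List (String × String))), Dom_extract_venue_from_listings listings → Pre_extract_venue_from_listings listings → Spec_extract_venue_from_listings listings (extract_venue_from_listings listings)

-- ===== LEMMAS AND PROOFS =====

-- first-match classification, used only by the proofs to relate the two traversals
def pvFirstVenue (c : List Char) : List (List String × String) → Option String
  | [] => none
  | (kws, v) :: rest =>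
      if kws.any (fun k => pvIn k c) then some v else pvFirstVenue c rest

-- pvFirstVenue applied to the literal table, unfolded (definitional)
theorem pvFirstVenue_unfold (c : List Char) :
    pvFirstVenue c pvTable =
     (if (["MEXICO CITY", "AZTECA"] : List String).any (fun k => pvIn k c) then some "Mexico City"
      else if (["TORONTO"] : List String).any (fun k => pvIn k c) then some "Toronto"
      else if (["NEW YORK"] : List String).any (fun k => pvIn k c) then some "New York"
      else if (["KANSAS CITY"] : List String).any (fun k => pvIn k c) then some "Kansas City"
      else if (["MIAMI"] : List String).any (fun k => pvIn k c) then some "Miami"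
      else if (["ATLANTA"] : List String).any (fun k => pvIn k c) then some "Atlanta"
      else if (["HOUSTON"] : List String).any (fun k => pvIn k c) then some "Houston"
      else if (["SEATTLE"] : List String).any (fun k => pvIn k c) then some "Seattle"
      else if (["PHILADELPHIA"] : List String).any (fun k => pvIn k c) then some "Philadelphia"
      else if (["VANCOUVER"] : List String).any (fun k => pvIn k c) then some "Vancouver"
      else if (["FOXBOROUGH", "GILLETTE"] : List String).any (fun k => pvIn k c) then some "Foxborough"
      else if (["INGLEWOOD", "SOFI"] : List String).any (fun k => pvIn k c) then some "Inglewood"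
      else if (["ARLINGTON"] : List String).any (fun k => pvIn k c) then some "Arlington"
      else if (["SANTA CLARA"] : List String).any (fun k => pvIn k c) then some "Santa Clara"
      else if (["GUADALUPE"] : List String).any (fun k => pvIn k c) then some "Guadalupe"
      else if (["ZAPOPAN"] : List String).any (fun k => pvIn k c) then some "Zapopan"
      else none) := rfl

-- A's if/elif chain appends exactly the first matching entry of the table
theorem pv_stepA_eq (c : List Char) (acc : List String) :
    (if pvIn "MEXICO CITY" c || pvIn "AZTECA" c then acc ++ ["Mexico City"]
     else if pvIn "TORONTO" c then acc ++ ["Toronto"]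
     else if pvIn "NEW YORK" c then acc ++ ["New York"]
     else if pvIn "KANSAS CITY" c then acc ++ ["Kansas City"]
     else if pvIn "MIAMI" c then acc ++ ["Miami"]
     else if pvIn "ATLANTA" c then acc ++ ["Atlanta"]
     else if pvIn "HOUSTON" c then acc ++ ["Houston"]
     else if pvIn "SEATTLE" c then acc ++ ["Seattle"]
     else if pvIn "PHILADELPHIA" c then acc ++ ["Philadelphia"]
     else if pvIn "VANCOUVER" c then acc ++ ["Vancouver"]
     else if pvIn "FOXBOROUGH" c || pvIn "GILLETTE" c then acc ++ ["Foxborough"]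
     else if pvIn "INGLEWOOD" c || pvIn "SOFI" c then acc ++ ["Inglewood"]
     else if pvIn "ARLINGTON" c then acc ++ ["Arlington"]
     else if pvIn "SANTA CLARA" c then acc ++ ["Santa Clara"]
     else if pvIn "GUADALUPE" c then acc ++ ["Guadalupe"]
     else if pvIn "ZAPOPAN" c then acc ++ ["Zapopan"]
     else acc)
    = match pvFirstVenue c pvTable with
      | some v => acc ++ [v]
      | none => acc := by
  rw [pvFirstVenue_unfold]
  simp only [List.any_cons, List.any_nil, Bool.or_false]
  by_cases h1 : (pvIn "MEXICO CITY" c || pvIn "AZTECA" c) = true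
  · rw [if_pos h1, if_pos h1]
  rw [if_neg h1, if_neg h1]
  by_cases h2 : (pvIn "TORONTO" c) = true
  · rw [if_pos h2, if_pos h2]
  rw [if_neg h2, if_neg h2]
  by_cases h3 : (pvIn "NEW YORK" c) = true
  · rw [if_pos h3, if_pos h3]
  rw [if_neg h3, if_neg h3]
  by_cases h4 : (pvIn "KANSAS CITY" c) = true
  · rw [if_pos h4, if_pos h4]
  rw [if_neg h4, if_neg h4]
  by_cases h5 : (pvIn "MIAMI" c) = true
  · rw [if_pos h5, if_pos h5]
  rw [if_neg h5, if_neg h5]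
  by_cases h6 : (pvIn "ATLANTA" c) = true
  · rw [if_pos h6, if_pos h6]
  rw [if_neg h6, if_neg h6]
  by_cases h7 : (pvIn "HOUSTON" c) = true
  · rw [if_pos h7, if_pos h7]
  rw [if_neg h7, if_neg h7]
  by_cases h8 : (pvIn "SEATTLE" c) = true
  · rw [if_pos h8, if_pos h8]
  rw [if_neg h8, if_neg h8]
  by_cases h9 : (pvIn "PHILADELPHIA" c) = true
  · rw [if_pos h9, if_pos h9]
  rw [if_neg h9, if_neg h9]
  by_cases h10 : (pvIn "VANCOUVER" c) = true
  · rw [if_pos h10, if_pos h10]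
  rw [if_neg h10, if_neg h10]
  by_cases h11 : (pvIn "FOXBOROUGH" c || pvIn "GILLETTE" c) = true
  · rw [if_pos h11, if_pos h11]
  rw [if_neg h11, if_neg h11]
  by_cases h12 : (pvIn "INGLEWOOD" c || pvIn "SOFI" c) = true
  · rw [if_pos h12, if_pos h12]
  rw [if_neg h12, if_neg h12]
  by_cases h13 : (pvIn "ARLINGTON" c) = true
  · rw [if_pos h13, if_pos h13]
  rw [if_neg h13, if_neg h13]
  by_cases h14 : (pvIn "SANTA CLARA" c) = true
  · rw [if_pos h14, if_pos h14]
  rw [if_neg h14, if_neg h14]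
  by_cases h15 : (pvIn "GUADALUPE" c) = true
  · rw [if_pos h15, if_pos h15]
  rw [if_neg h15, if_neg h15]
  by_cases h16 : (pvIn "ZAPOPAN" c) = true
  · rw [if_pos h16, if_pos h16]
  rw [if_neg h16, if_neg h16]

-- the first-match recursion over the table is the declarative find? used by Pre_
theorem pv_firstVenue_eq_find (c : List Char) (t : List (List String × String)) :
    pvFirstVenue c t = (t.find? (fun e => e.1.any (fun k => pvIn k c))).map (·.2) := by
  induction t with
  | nil => rfl
  | cons e rest ih =>
    obtain ⟨kws, v⟩ := e
    by_cases h : kws.any (fun k => pvIn k c) = true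
    · simp [pvFirstVenue, List.find?_cons_of_pos, h]
    · simp [pvFirstVenue, List.find?_cons_of_neg, h, ih]

-- A's accumulation loop collects the classified venues
theorem pv_foldA (l : List (List (String × String))) (acc : List String) :
    l.foldl (fun acc x =>
        match pvFirstVenue (pvComb x) pvTable with
        | some v => acc ++ [v]
        | none => acc) acc
      = acc ++ l.filterMap (fun x => pvFirstVenue (pvComb x) pvTable) := by
  induction l generalizing acc with
  | nil => simp
  | cons x t ih =>
    simp only [List.foldl_cons, List.filterMap_cons]
    cases h : pvFirstVenue (pvComb x) pvTable <;> simp [ih]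

-- a classified venue is a table venue name
theorem pv_firstVenue_mem (c : List Char) (t : List (List String × String)) (v : String)
    (h : pvFirstVenue c t = some v) : v ∈ t.map (·.2) := by
  induction t with
  | nil => simp [pvFirstVenue] at h
  | cons e rest ih =>
    obtain ⟨kws, w⟩ := e
    by_cases hm : kws.any (fun k => pvIn k c) = true
    · simp [pvFirstVenue, hm] at h; simp [h]
    · simp only [pvFirstVenue, hm, if_false, Bool.false_eq_true] at h
      exact List.mem_cons_of_mem _ (ih h)

-- Source B's inner loop, characterised as a countP
theorem pv_count_eq_countP (texts : List (List Char)) (kws : List String)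
    (E : List (List String)) (n0 : Nat) :
    texts.foldl (fun n t =>
        if pvMatch t kws && !(E.any (fun kws' => pvMatch t kws')) then n + 1 else n) n0
      = n0 + texts.countP (fun t => pvMatch t kws && !(E.any (fun kws' => pvMatch t kws'))) := by
  induction texts generalizing n0 with
  | nil => simp
  | cons t rest ih =>
    simp only [List.foldl_cons, List.countP_cons]
    by_cases h : (pvMatch t kws && !(E.any (fun kws' => pvMatch t kws'))) = true
    · rw [if_pos h, ih]; simp [h]; omega
    · rw [if_neg h, ih]; simp [h]

-- count of a value in a filterMap is a countP over the sources
theorem pv_count_filterMap {α : Type} (f : α → Option String) (l : List α) (v : String) :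
    (l.filterMap f).count v = l.countP (fun x => f x == some v) := by
  induction l with
  | nil => rfl
  | cons x t ih =>
    simp only [List.filterMap_cons, List.countP_cons]
    cases h : f x with
    | none => simp [h, ih]
    | some w =>
      by_cases hv : w = v
      · subst hv; simp [h, ih, List.count_cons]
      · simp [h, ih, hv]

-- first-match equals a given entry iff that entry matches and no earlier one does (names nodup)
theorem pv_first_eq_entry (c : List Char) (p r : List (List String × String))
    (e : List String × String)
    (hnd : ((p ++ e :: r).map (·.2)).Nodup) :
    (pvFirstVenue c (p ++ e :: r) == some e.2)
      = (pvMatch c e.1 && !(p.any (fun e' => pvMatch c e'.1))) := by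
  induction p with
  | nil =>
    simp only [List.nil_append, List.any_nil, Bool.not_false, Bool.and_true]
    obtain ⟨kws, v⟩ := e
    by_cases hm : kws.any (fun k => pvIn k c) = true
    · simp [pvFirstVenue, hm, pvMatch]
    · simp only [pvFirstVenue, hm, if_false, Bool.false_eq_true]
      have hv : v ∉ r.map (·.2) := by
        have h' := hnd; simp only [List.nil_append, List.map_cons, List.nodup_cons] at h'
        exact h'.1
      have : pvFirstVenue c r ≠ some v := by
        intro h; exact hv (pv_firstVenue_mem c r v h)
      simp [pvMatch, hm, this]
  | cons e' p' ih =>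
    simp only [List.cons_append] at hnd ⊢
    obtain ⟨kws', v'⟩ := e'
    by_cases hm : kws'.any (fun k => pvIn k c) = true
    · have hne : v' ≠ e.2 := by
        simp only [List.map_cons, List.nodup_cons, List.map_append, List.map_cons] at hnd
        intro h; exact hnd.1 (by rw [h]; exact List.mem_append_right _ List.mem_cons_self)
      simp [pvFirstVenue, hm, pvMatch, hne]
    · have hnd' : ((p' ++ e :: r).map (·.2)).Nodup := by
        simp only [List.map_cons, List.nodup_cons] at hnd; exact hnd.2
      simp only [pvFirstVenue, hm, if_false, Bool.false_eq_true, List.any_cons]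
      rw [ih hnd']
      simp [pvMatch, hm]

-- annotate a table suffix with Source B's per-venue counts (prefix keywords accumulated)
def pvAnnot (texts : List (List Char)) (E : List (List String)) :
    List (List String × String) → List (String × Nat)
  | [] => []
  | e :: rest => (e.2, pvCount texts e.1 E) :: pvAnnot texts (E ++ [e.1]) rest

-- B's triple-state fold decomposes into annotation then a strict-improvement scan
theorem pv_foldB_decomp (texts : List (List Char)) (t : List (List String × String))
    (b : String) (cnt : Nat) (E : List (List String)) :
    t.foldl (fun st e =>
        let n := pvCount texts e.1 st.2.2
        let p := if n > st.2.1 then (e.2, n) else (st.1, st.2.1)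
        (p.1, p.2, st.2.2 ++ [e.1])) (b, cnt, E)
      = (((pvAnnot texts E t).foldl
            (fun bc p => if p.2 > bc.2 then p else bc) (b, cnt)).1,
         ((pvAnnot texts E t).foldl
            (fun bc p => if p.2 > bc.2 then p else bc) (b, cnt)).2,
         E ++ t.map (·.1)) := by
  induction t generalizing b cnt E with
  | nil => simp [pvAnnot]
  | cons e rest ih =>
    simp only [List.foldl_cons, pvAnnot, List.map_cons]
    by_cases h : pvCount texts e.1 E > cnt
    · rw [if_pos h]; simp only []; rw [ih]; simp
    · rw [if_neg h]; simp only []; rw [ih]; simp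

-- with the whole-table context, each annotated count is the count of that venue
-- among the classified venues
theorem pv_annot_counts (texts : List (List Char)) (p t : List (List String × String))
    (hsplit : p ++ t = pvTable)
    (hnd : (pvTable.map (·.2)).Nodup) :
    pvAnnot texts (p.map (·.1)) t
      = t.map (fun e => (e.2,
          (texts.filterMap (fun c => pvFirstVenue c pvTable)).count e.2)) := by
  induction t generalizing p with
  | nil => rfl
  | cons e rest ih =>
    simp only [pvAnnot, List.map_cons, List.cons.injEq, Prod.mk.injEq, true_and]
    refine ⟨?_, ?_⟩
    · -- head: the count
      have hnd' : ((p ++ e :: rest).map (·.2)).Nodup := by rw [hsplit]; exact hnd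
      rw [pv_count_filterMap]
      unfold pvCount
      rw [pv_count_eq_countP]
      simp only [Nat.zero_add]
      congr 1
      funext c
      rw [← hsplit]
      rw [pv_first_eq_entry c p rest e hnd']
      simp [pvMatch, Function.comp_def]
    · -- tail
      have : p.map (·.1) ++ [e.1] = (p ++ [e]).map (·.1) := by simp
      rw [this, ih (p ++ [e]) (by simpa using hsplit)]

-- the strict-improvement scan: the result is the seed or an element, and dominates all
theorem pv_scan_spec (its : List (String × Nat)) (b0 : String × Nat) :
    (its.foldl (fun best p => if p.2 > best.2 then p else best) b0 = b0
      ∨ its.foldl (fun best p => if p.2 > best.2 then p else best) b0 ∈ its)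
    ∧ b0.2 ≤ (its.foldl (fun best p => if p.2 > best.2 then p else best) b0).2
    ∧ ∀ p ∈ its, p.2 ≤ (its.foldl (fun best p => if p.2 > best.2 then p else best) b0).2 := by
  induction its generalizing b0 with
  | nil => simp
  | cons q t ih =>
    simp only [List.foldl_cons]
    by_cases h : q.2 > b0.2
    · simp only [if_pos h]
      obtain ⟨h1, h2, h3⟩ := ih q
      refine ⟨?_, le_trans (le_of_lt h) h2, ?_⟩
      · rcases h1 with h1 | h1
        · exact Or.inr (by rw [h1]; exact List.mem_cons_self)
        · exact Or.inr (List.mem_cons_of_mem _ h1)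
      · intro p hp
        rcases List.mem_cons.mp hp with rfl | hp
        · exact h2
        · exact h3 p hp
    · simp only [if_neg h]
      obtain ⟨h1, h2, h3⟩ := ih b0
      refine ⟨?_, h2, ?_⟩
      · rcases h1 with h1 | h1
        · exact Or.inl h1
        · exact Or.inr (List.mem_cons_of_mem _ h1)
      · intro p hp
        rcases List.mem_cons.mp hp with rfl | hp
        · exact le_trans (not_lt.mp h) h2
        · exact h3 p hp

-- the scan never moves if nothing strictly beats the seed
theorem pv_scan_fixed (its : List (String × Nat)) (b0 : String × Nat)
    (h : ∀ p ∈ its, p.2 ≤ b0.2) :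
    its.foldl (fun best p => if p.2 > best.2 then p else best) b0 = b0 := by
  induction its with
  | nil => rfl
  | cons q t ih =>
    simp only [List.foldl_cons]
    rw [if_neg (by exact not_lt.mpr (h q List.mem_cons_self))]
    exact ih (fun p hp => h p (List.mem_cons_of_mem _ hp))

-- under a unique most-common venue, A's pick over set(venues) and B's venue-major
-- argmax over the per-venue counts agree
theorem pv_sel (vs : List String)
    (hv : ∀ v ∈ vs, v ∈ pvTable.map (·.2))
    (htie : ∀ v ∈ vs, ∀ w ∈ vs, (∀ u ∈ vs, vs.count u ≤ vs.count v) → vs.count w = vs.count v → w = v) :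
    pvPick vs
      = ((pvTable.map (fun e => (e.2, vs.count e.2))).foldl
          (fun best p => if p.2 > best.2 then p else best) ("Unknown", 0)).1 := by
  by_cases hne : vs = []
  · subst hne
    rw [pv_scan_fixed _ _ (by intro p hp; simp only [List.mem_map] at hp; obtain ⟨e, _, rfl⟩ := hp; simp)]
    rfl
  · unfold pvPick
    rw [if_neg hne]
    obtain ⟨m, hm⟩ : ∃ m, PySem.List.max? (PySem.Set.ofList vs) (fun v => PySem.List.count vs v) = some m := by
      cases h : PySem.List.max? (PySem.Set.ofList vs) (fun v => PySem.List.count vs v) with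
      | some m => exact ⟨m, rfl⟩
      | none =>
        rw [PySem.List.max?_eq_none_iff] at h
        obtain ⟨x, hx⟩ := List.exists_mem_of_ne_nil vs hne
        exact absurd ((PySem.Set.mem_ofList vs x).mpr hx) (by simp [h])
    have hmS : m ∈ PySem.Set.ofList vs := PySem.List.max?_mem hm
    have hmvs : m ∈ vs := (PySem.Set.mem_ofList vs m).mp hmS
    have hmax := PySem.List.max?_isMax hm
    have hmaxvs : ∀ u ∈ vs, vs.count u ≤ vs.count m := by
      intro u hu
      have := hmax u ((PySem.Set.mem_ofList vs u).mpr hu)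
      simpa [PySem.List.count, List.count] using this
    set L := pvTable.map (fun e => (e.2, vs.count e.2)) with hL
    obtain ⟨hsc1, hsc2, hsc3⟩ := pv_scan_spec L ("Unknown", 0)
    set r := L.foldl (fun best p => if p.2 > best.2 then p else best) ("Unknown", 0) with hr
    have hmL : (m, vs.count m) ∈ L := by
      obtain ⟨e, he, heq⟩ := List.mem_map.mp (hv m hmvs)
      exact List.mem_map.mpr ⟨e, he, by rw [heq]⟩
    have hmpos : 0 < vs.count m := List.count_pos_iff.mpr hmvs
    have hrpos : 0 < r.2 := lt_of_lt_of_le hmpos (hsc3 _ hmL)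
    have hrmem : r ∈ L := by
      rcases hsc1 with h1 | h1
      · exfalso; rw [h1] at hrpos; simp at hrpos
      · exact h1
    obtain ⟨e, heT, her⟩ := List.mem_map.mp hrmem
    have hr1 : r.1 = e.2 := by rw [← her]
    have hr2 : r.2 = vs.count e.2 := by rw [← her]
    have huvs : e.2 ∈ vs := List.count_pos_iff.mp (by rw [← hr2]; exact hrpos)
    have hcnt : vs.count e.2 = vs.count m :=
      le_antisymm (hmaxvs _ huvs) (by rw [← hr2]; exact hsc3 _ hmL)
    have : e.2 = m := htie m hmvs e.2 huvs hmaxvs hcnt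
    rw [hm, hr1, this]
    rfl

-- table venue names are distinct
theorem pv_table_nodup : (pvTable.map (·.2)).Nodup := by decide

-- ===== VERDICT (by name: the statement is the Claim_ definition above) =====
theorem extract_venue_from_listings_spec : Claim_equal_extract_venue_from_listings := by
  intro listings _hDom hPre
  unfold Spec_extract_venue_from_listings
  unfold extract_venue_from_listings extract_venue_from_listings_alt
  rw [PySem.List.foldl_congr_mem listings _
        (fun acc x =>
          match pvFirstVenue (pvComb x) pvTable with
          | some v => acc ++ [v]
          | none => acc) []
        (fun acc x _ => pv_stepA_eq (pvComb x) acc)]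
  rw [pv_foldA]
  simp only [List.nil_append]
  have hEnil : ([] : List (List String)) = ([] : List (List String × String)).map (·.1) := rfl
  rw [pv_foldB_decomp (listings.map pvComb) pvTable "Unknown" 0 []]
  rw [hEnil, pv_annot_counts (listings.map pvComb) [] pvTable rfl pv_table_nodup]
  have hfm : (listings.map pvComb).filterMap (fun c => pvFirstVenue c pvTable)
      = listings.filterMap (fun x => pvFirstVenue (pvComb x) pvTable) := by
    rw [List.filterMap_map]; rfl
  rw [hfm]
  have hvs : listings.filterMap (fun x => pvFirstVenue (pvComb x) pvTable) = pvVenues listings := by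
    unfold pvVenues pvVenueOf
    congr 1
    funext x
    rw [pv_firstVenue_eq_find]
  rw [hvs]
  refine pv_sel (pvVenues listings) ?_ hPre
  · intro v hvv
    unfold pvVenues at hvv
    obtain ⟨l, _, hl⟩ := List.mem_filterMap.mp hvv
    unfold pvVenueOf at hl
    rw [← pv_firstVenue_eq_find] at hl
    exact pv_firstVenue_mem _ _ _ hl
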